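-- pv_equiv track=rewrite | github.com/ldk00315-jpg/openclaw-mai | skills/quota-check/check_quota.py | parse_ratelimit_headers
-- ===== SOURCE A (Python) =====
-- def parse_ratelimit_headers(headers):
--     """Extract rate limit info from response headers"""
--     info = {}
--     h = {k.lower(): v for k, v in headers.items()}
--
--     for prefix in ['x-ratelimit-', 'ratelimit-']:
--         if f'{prefix}remaining-requests' in h:
--             info['remaining_req'] = h[f'{prefix}remaining-requests']
--         if f'{prefix}limit-requests' in h:
--             info['limit_req'] = h[f'{prefix}limit-requests']
--         if f'{prefix}remaining-tokens' in h:
--             info['remaining_tok'] = h[f'{prefix}remaining-tokens']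
--         if f'{prefix}limit-tokens' in h:
--             info['limit_tok'] = h[f'{prefix}limit-tokens']
--         if f'{prefix}reset-requests' in h:
--             info['reset'] = h[f'{prefix}reset-requests']
--         elif f'{prefix}reset' in h:
--             info['reset'] = h[f'{prefix}reset']
--
--     if 'retry-after' in h:
--         info['retry_after'] = h['retry-after']
--
--     return info
-- ===== SOURCE B (Python) =====
-- # Data-driven: a flat priority table (lowest to highest) mapping header names to
-- # output keys; one uniform last-wins assignment loop replaces the hard-coded
-- # per-prefix if/elif chains.
-- PRIORITY = [
--     ('x-ratelimit-remaining-requests', 'remaining_req'),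
--     ('x-ratelimit-limit-requests', 'limit_req'),
--     ('x-ratelimit-remaining-tokens', 'remaining_tok'),
--     ('x-ratelimit-limit-tokens', 'limit_tok'),
--     ('x-ratelimit-reset', 'reset'),
--     ('x-ratelimit-reset-requests', 'reset'),
--     ('ratelimit-remaining-requests', 'remaining_req'),
--     ('ratelimit-limit-requests', 'limit_req'),
--     ('ratelimit-remaining-tokens', 'remaining_tok'),
--     ('ratelimit-limit-tokens', 'limit_tok'),
--     ('ratelimit-reset', 'reset'),
--     ('ratelimit-reset-requests', 'reset'),
--     ('retry-after', 'retry_after'),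
-- ]
--
--
-- def parse_ratelimit_headers(headers):
--     """Extract rate limit info from response headers"""
--     h = {k.lower(): v for k, v in headers.items()}
--     info = {}
--     for name, key in PRIORITY:
--         if name in h:
--             info[key] = h[name]
--     return info
-- ===== Notes on version B (the rewrite author's own statement) =====
-- stated objective: simpler
-- what changed: Replaced A's two hard-coded prefix passes of if/elif dict mutations by a flat data-driven priority table of (header-name, output-key) pairs processed by one uniform last-wins assignment loop.
import Mathlib
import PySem

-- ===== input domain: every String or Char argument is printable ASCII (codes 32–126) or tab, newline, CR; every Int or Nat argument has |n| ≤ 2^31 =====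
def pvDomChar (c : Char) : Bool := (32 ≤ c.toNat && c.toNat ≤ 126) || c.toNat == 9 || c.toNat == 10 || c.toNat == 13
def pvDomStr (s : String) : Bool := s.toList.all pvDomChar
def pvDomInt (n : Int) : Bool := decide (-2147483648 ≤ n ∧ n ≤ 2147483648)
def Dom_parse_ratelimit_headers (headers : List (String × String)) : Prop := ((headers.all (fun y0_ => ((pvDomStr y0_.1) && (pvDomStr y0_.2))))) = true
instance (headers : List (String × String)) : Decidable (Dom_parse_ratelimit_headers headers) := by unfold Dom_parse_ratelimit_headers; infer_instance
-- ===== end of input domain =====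

-- ===== PORT A =====
-- literal transliteration: lowercased header dict, then two prefix passes of if/elif inserts
def parse_ratelimit_headers (headers : List (String × String)) : List (String × String) :=
  let h : PySem.Dict String String :=
    headers.foldl (fun d kv => d.insert (PySem.Str.lower kv.1) kv.2) PySem.Dict.empty
  let info : PySem.Dict String String :=
    ["x-ratelimit-", "ratelimit-"].foldl (fun info pfx =>
      let info := if h.contains (pfx ++ "remaining-requests") then info.insert "remaining_req" (h.getD (pfx ++ "remaining-requests") "") else info
      let info := if h.contains (pfx ++ "limit-requests") then info.insert "limit_req" (h.getD (pfx ++ "limit-requests") "") else info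
      let info := if h.contains (pfx ++ "remaining-tokens") then info.insert "remaining_tok" (h.getD (pfx ++ "remaining-tokens") "") else info
      let info := if h.contains (pfx ++ "limit-tokens") then info.insert "limit_tok" (h.getD (pfx ++ "limit-tokens") "") else info
      if h.contains (pfx ++ "reset-requests") then info.insert "reset" (h.getD (pfx ++ "reset-requests") "")
      else if h.contains (pfx ++ "reset") then info.insert "reset" (h.getD (pfx ++ "reset") "")
      else info) PySem.Dict.empty
  let info := if h.contains "retry-after" then info.insert "retry_after" (h.getD "retry-after" "") else info
  info.items

-- ===== PORT B =====
-- B: flat priority table (lowest to highest), one uniform last-wins assignment loop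
def pvPriority : List (String × String) :=
  [ ("x-ratelimit-remaining-requests", "remaining_req"),
    ("x-ratelimit-limit-requests", "limit_req"),
    ("x-ratelimit-remaining-tokens", "remaining_tok"),
    ("x-ratelimit-limit-tokens", "limit_tok"),
    ("x-ratelimit-reset", "reset"),
    ("x-ratelimit-reset-requests", "reset"),
    ("ratelimit-remaining-requests", "remaining_req"),
    ("ratelimit-limit-requests", "limit_req"),
    ("ratelimit-remaining-tokens", "remaining_tok"),
    ("ratelimit-limit-tokens", "limit_tok"),
    ("ratelimit-reset", "reset"),
    ("ratelimit-reset-requests", "reset"),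
    ("retry-after", "retry_after") ]

def parse_ratelimit_headers_alt (headers : List (String × String)) : List (String × String) :=
  let h : PySem.Dict String String :=
    headers.foldl (fun d kv => d.insert (PySem.Str.lower kv.1) kv.2) PySem.Dict.empty
  let info : PySem.Dict String String :=
    pvPriority.foldl (fun info nk =>
      if h.contains nk.1 then info.insert nk.2 (h.getD nk.1 "") else info) PySem.Dict.empty
  info.items

-- ===== PRECONDITION & SPEC =====
def Spec_parse_ratelimit_headers (headers : List (String × String)) (out : List (String × String)) : Prop := out = parse_ratelimit_headers_alt headers
instance (headers : List (String × String)) (out : List (String × String)) : Decidable (Spec_parse_ratelimit_headers headers out) := by unfold Spec_parse_ratelimit_headers; infer_instance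

-- ===== CLAIM (what is proved, stated in full; the proofs are below) =====
def Claim_equal_parse_ratelimit_headers : Prop := ∀ (headers : List (String × String)), Dom_parse_ratelimit_headers headers → Spec_parse_ratelimit_headers headers (parse_ratelimit_headers headers)

-- ===== LEMMAS AND PROOFS =====
-- A's 'if reset-requests … elif reset …' equals B's two successive last-wins steps (reset first, reset-requests second)
theorem pv_reset_pair (h info : PySem.Dict String String) (rq r : String) :
    (if h.contains rq then
        (if h.contains r then info.insert "reset" (h.getD r "") else info).insert "reset" (h.getD rq "")
      else if h.contains r then info.insert "reset" (h.getD r "") else info)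
    = (if h.contains rq then info.insert "reset" (h.getD rq "")
       else if h.contains r then info.insert "reset" (h.getD r "")
       else info) := by
  by_cases hrq : h.contains rq = true <;> by_cases hr : h.contains r = true <;>
    simp [hrq, hr, PySem.Dict.insert_insert_self]

-- ===== VERDICT (by name: the statement is the Claim_ definition above) =====
theorem parse_ratelimit_headers_spec : Claim_equal_parse_ratelimit_headers := by
  intro headers _
  unfold Spec_parse_ratelimit_headers parse_ratelimit_headers parse_ratelimit_headers_alt pvPriority
  simp only [List.foldl, String.reduceAppend]
  rw [pv_reset_pair, pv_reset_pair]
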